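-- pv_equiv track=rewrite | github.com/SamMiller3/Number-Theory | Cryptography/RSA algorithm.py | generate_large_primes
-- ===== SOURCE A (Python) =====
-- import math
--
-- def generate_large_primes(index_one,index_two):
--
--     n = 2000000 # generate primes up to 2 million using Sieve of Eratosthenes
--     sieve = [True]*n
--     sieve[0]=sieve[1]=False
--
--     for i in range(2,math.isqrt(n)):
--         if sieve[i]==True:
--             for j in range((i*i),n,i):
--                 sieve[j]=False
--
--     primes=[]
--     for i in range(len(sieve)):
--         if sieve[i]:
--             primes.append(i)
--
--     chosen_primes=[primes[index_one],primes[index_two]]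
--     return(chosen_primes)
-- ===== SOURCE B (Python) =====
-- def generate_large_primes(index_one, index_two):
--     # Trial division by the primes already found (up to the candidate's square
--     # root), instead of a Sieve of Eratosthenes boolean table.
--     primes = []
--     for m in range(2, 2000000):
--         is_p = True
--         for p in primes:
--             if p * p > m:
--                 break
--             if m % p == 0:
--                 is_p = False
--                 break
--         if is_p:
--             primes.append(m)
--     return [primes[index_one], primes[index_two]]
-- ===== Notes on version B (the rewrite author's own statement) =====
-- stated objective: alternative
-- what changed: Replaces the Sieve of Eratosthenes boolean table (and its marking passes plus extraction scan) by a single loop that trial-divides each candidate from 2 to 1999999 by the primes collected so far, stopping at the candidate's square root.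
import Mathlib
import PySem

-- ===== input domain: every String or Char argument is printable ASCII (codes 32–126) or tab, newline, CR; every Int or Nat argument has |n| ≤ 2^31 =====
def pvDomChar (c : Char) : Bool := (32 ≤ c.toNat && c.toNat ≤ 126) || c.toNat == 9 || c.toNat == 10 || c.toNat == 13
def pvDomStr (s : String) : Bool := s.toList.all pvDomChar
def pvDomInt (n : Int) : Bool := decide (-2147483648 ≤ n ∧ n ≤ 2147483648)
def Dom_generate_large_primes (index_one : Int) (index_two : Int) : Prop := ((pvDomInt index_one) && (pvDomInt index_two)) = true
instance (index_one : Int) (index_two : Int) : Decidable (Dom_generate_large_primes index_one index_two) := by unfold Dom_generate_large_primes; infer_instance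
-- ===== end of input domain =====

-- B replaces A's Sieve-of-Eratosthenes boolean table by trial division of each
-- candidate by the primes already collected (alternative algorithm, not faster).


-- ===== PORT A =====
-- Python's mutable list of booleans is ported as Array Bool (in-place update);
-- every index fed to Int.toNat below comes from a nonnegative range, so toNat is exact.
-- sieve = [True]*n; sieve[0]=sieve[1]=False
def pvInit : Array Bool :=
  ((Array.replicate 2000000 true).set! 0 false).set! 1 false

-- inner loop: for j in range(i*i, n, i): sieve[j] = False
def pvMarkA (sv : Array Bool) (i : Int) : Array Bool :=
  (PySem.List.pyRange (i * i) 2000000 i).foldl (fun sv j => sv.set! j.toNat false) sv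

-- outer loop body: if sieve[i]==True: <inner loop>
def pvStepA (sv : Array Bool) (i : Int) : Array Bool :=
  if sv[i.toNat]! == true then pvMarkA sv i else sv

-- for i in range(2, math.isqrt(n)): …
def pvSieveA : Array Bool :=
  (PySem.List.pyRange 2 ((Nat.sqrt 2000000 : Nat) : Int) 1).foldl pvStepA pvInit

-- primes = []; for i in range(len(sieve)): if sieve[i]: primes.append(i)
def pvStepP (acc : Array Int) (i : Int) : Array Int :=
  if pvSieveA[i.toNat]! then acc.push i else acc

def pvPrimesA : Array Int :=
  (PySem.List.pyRange 0 2000000 1).foldl pvStepP #[]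

def generate_large_primes (index_one : Int) (index_two : Int) : List Int :=
  [PySem.List.pyGetD pvPrimesA.toList index_one 0,
   PySem.List.pyGetD pvPrimesA.toList index_two 0]

-- ===== PORT B =====
-- for p in primes: if p*p > m: break; if m % p == 0: is_p = False; break
-- (a for-with-break over the growing list, ported as index recursion)
def pvTrial (primes : Array Int) (m : Int) (k : Nat) : Bool :=
  if h : k < primes.size then
    let p := primes[k]
    if p * p > m then true
    else if PySem.Int.mod m p == 0 then false
    else pvTrial primes m (k + 1)
  else true
termination_by primes.size - k

-- loop body: is_p = <trial division>; if is_p: primes.append(m)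
def pvStepB (primes : Array Int) (m : Int) : Array Int :=
  if pvTrial primes m 0 then primes.push m else primes

-- primes = []; for m in range(2, 2000000): …
def pvPrimesB : Array Int :=
  (PySem.List.pyRange 2 2000000 1).foldl pvStepB #[]

def generate_large_primes_alt (index_one : Int) (index_two : Int) : List Int :=
  [PySem.List.pyGetD pvPrimesB.toList index_one 0,
   PySem.List.pyGetD pvPrimesB.toList index_two 0]

-- ===== PRECONDITION & SPEC =====
-- Pre_ excludes exactly the inputs on which Python A raises IndexError:
-- an index outside [-148933, 148933), 148933 being the number of primes below 2000000.
def Pre_generate_large_primes (index_one : Int) (index_two : Int) : Prop :=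
  PySem.Raise.InRange 148933 index_one ∧ PySem.Raise.InRange 148933 index_two
instance (index_one : Int) (index_two : Int) : Decidable (Pre_generate_large_primes index_one index_two) := by unfold Pre_generate_large_primes; infer_instance

def pvWitness_generate_large_primes : Int × Int := (0, -1)

def Spec_generate_large_primes (index_one : Int) (index_two : Int) (out : List Int) : Prop := out = generate_large_primes_alt index_one index_two
instance (index_one : Int) (index_two : Int) (out : List Int) : Decidable (Spec_generate_large_primes index_one index_two out) := by unfold Spec_generate_large_primes; infer_instance

-- ===== CLAIM (what is proved, stated in full; the proofs are below) =====
def Claim_equal_generate_large_primes : Prop := ∀ (index_one : Int) (index_two : Int), Dom_generate_large_primes index_one index_two → Pre_generate_large_primes index_one index_two → Spec_generate_large_primes index_one index_two (generate_large_primes index_one index_two)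

-- ===== LEMMAS AND PROOFS =====

-- `j is unmarked after the outer loop has processed 2,…,k-1`:
-- j ≥ 2 and no prime p < k with p*p ≤ j divides j.
def pvGood (k j : Nat) : Prop :=
  2 ≤ j ∧ ∀ p : Nat, p < k → Nat.Prime p → p * p ≤ j → ¬ p ∣ j

lemma pvGoodSelf (k : Nat) (hk : 2 ≤ k) : pvGood k k ↔ Nat.Prime k := by
  constructor
  · rintro ⟨-, h⟩
    by_contra hnp
    have hp : Nat.Prime k.minFac := Nat.minFac_prime (by omega)
    have hd : k.minFac ∣ k := Nat.minFac_dvd k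
    have hsq : k.minFac ^ 2 ≤ k := Nat.minFac_sq_le_self (by omega) hnp
    have h2 : 2 ≤ k.minFac := hp.two_le
    have hlt : k.minFac < k := by nlinarith [hsq]
    exact h k.minFac hlt hp (by nlinarith [hsq]) hd
  · intro hp
    refine ⟨hk, fun p hlt hpp hsq hdvd => ?_⟩
    have := (Nat.Prime.eq_one_or_self_of_dvd hp p hdvd).resolve_left hpp.one_lt.ne'
    omega

lemma pvGood_succ (k j : Nat) :
    pvGood (k + 1) j ↔ pvGood k j ∧ (Nat.Prime k → k * k ≤ j → ¬ k ∣ j) := by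
  unfold pvGood
  constructor
  · rintro ⟨h2, h⟩
    exact ⟨⟨h2, fun p hlt => h p (by omega)⟩, fun hp hsq => h k (by omega) hp hsq⟩
  · rintro ⟨⟨h2, h⟩, hk⟩
    refine ⟨h2, fun p hlt hp hsq hd => ?_⟩
    rcases Nat.lt_succ_iff_lt_or_eq.mp hlt with h' | rfl
    · exact h p h' hp hsq hd
    · exact hk hp hsq hd

-- the final condition characterises primality below 2000000
lemma pvGood_final (j : Nat) (hj : j < 2000000) : pvGood 1414 j ↔ Nat.Prime j := by
  constructor
  · rintro ⟨h2, h⟩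
    by_contra hnp
    have hp : Nat.Prime j.minFac := Nat.minFac_prime (by omega)
    have hd : j.minFac ∣ j := Nat.minFac_dvd j
    have hsq : j.minFac ^ 2 ≤ j := Nat.minFac_sq_le_self (by omega) hnp
    have h2m : 2 ≤ j.minFac := hp.two_le
    have hle : j.minFac ≤ 1414 := by nlinarith [hsq]
    have hne : j.minFac ≠ 1414 := by
      intro he
      have : ¬ Nat.Prime 1414 := by norm_num
      exact this (he ▸ hp)
    exact h j.minFac (by omega) hp (by nlinarith [hsq]) hd
  · intro hp
    refine ⟨hp.two_le, fun p hlt hpp hsq hd => ?_⟩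
    have := (Nat.Prime.eq_one_or_self_of_dvd hp p hd).resolve_left hpp.one_lt.ne'
    subst this
    nlinarith [hpp.two_le]

-- ---- array plumbing ----

lemma pvGetBang_set (a : Array Bool) (i t : Nat) (v : Bool) (ht : t < a.size) :
    (a.set! i v)[t]! = if i = t then v else a[t]! := by
  have hts : t < (a.set! i v).size := by simpa [Array.set!] using ht
  rw [getElem!_pos (a.set! i v) t hts, getElem!_pos a t ht]
  simpa [Array.set!] using Array.getElem_setIfInBounds (xs := a) (i := i) (a := v) (j := t) (by simpa using ht)

lemma pvInit_size : pvInit.size = 2000000 := by simp [pvInit, Array.set!]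

lemma pvInit_val (j : Nat) (hj : j < 2000000) : pvInit[j]! = decide (2 ≤ j) := by
  unfold pvInit
  rw [pvGetBang_set _ 1 j false (by simp [Array.set!]; omega),
      pvGetBang_set _ 0 j false (by simp; omega),
      getElem!_pos _ j (by simp; omega)]
  rcases Nat.lt_or_ge j 2 with h | h
  · interval_cases j <;> simp
  · have h1 : (1:Nat) ≠ j := by omega
    have h0 : (0:Nat) ≠ j := by omega
    simp [h1, h0, Array.getElem_replicate, h]

-- setting every index of l to false
lemma pvFoldSetFalse (l : List Int) (sv : Array Bool)
    (hl : ∀ j ∈ l, 0 ≤ j ∧ j < 2000000) (hsz : sv.size = 2000000) :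
    (l.foldl (fun sv j => sv.set! j.toNat false) sv).size = 2000000 ∧
    ∀ t : Nat, t < 2000000 →
      (l.foldl (fun sv j => sv.set! j.toNat false) sv)[t]! =
        if ((t : Int) ∈ l) then false else sv[t]! := by
  induction l generalizing sv with
  | nil => exact ⟨hsz, fun t ht => by simp⟩
  | cons j l ih =>
    obtain ⟨hj0, hjlt⟩ := hl j (by simp)
    have hsz' : (sv.set! j.toNat false).size = 2000000 := by simp [Array.set!, hsz]
    obtain ⟨s1, s2⟩ := ih (sv.set! j.toNat false) (fun x hx => hl x (by simp [hx])) hsz'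
    refine ⟨by simpa using s1, fun t ht => ?_⟩
    have hs := s2 t ht
    simp only [List.foldl_cons] at *
    rw [hs, pvGetBang_set sv j.toNat t false (by omega)]
    by_cases hjt : (t : Int) = j
    · have he : j.toNat = t := by omega
      simp [he, hjt]
    · have he : j.toNat ≠ t := by omega
      simp [he, hjt]

-- ---- the sieve invariant ----

def pvInv (k : Nat) (sv : Array Bool) : Prop :=
  sv.size = 2000000 ∧ ∀ j : Nat, j < 2000000 → (sv[j]! = true ↔ pvGood k j)

lemma pvInv_step (k : Nat) (hk : 2 ≤ k) (hklt : k < 2000000) (sv : Array Bool)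
    (h : pvInv k sv) : pvInv (k + 1) (pvStepA sv (k : Int)) := by
  obtain ⟨hsz, hval⟩ := h
  by_cases hp : Nat.Prime k
  · -- guard is true, pvMarkA runs
    have hgk : sv[k]! = true := (hval k hklt).mpr ((pvGoodSelf k hk).mpr hp)
    have hguard : pvStepA sv (k : Int) = pvMarkA sv (k : Int) := by
      simp [pvStepA, hgk]
    rw [hguard]
    unfold pvMarkA
    have hl : ∀ j ∈ PySem.List.pyRange ((k:Int) * (k:Int)) 2000000 (k:Int), 0 ≤ j ∧ j < 2000000 := by
      intro j hj
      rw [PySem.List.mem_pyRange_iff_of_pos (by positivity)] at hj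
      constructor
      · nlinarith [hj.1]
      · exact hj.2.1
    obtain ⟨s1, s2⟩ := pvFoldSetFalse _ sv hl hsz
    refine ⟨s1, fun j hj => ?_⟩
    rw [s2 j hj]
    have hmem : ((j : Int) ∈ PySem.List.pyRange ((k:Int) * (k:Int)) 2000000 (k:Int)) ↔
        (k * k ≤ j ∧ k ∣ j) := by
      rw [PySem.List.mem_pyRange_iff_of_pos (by positivity)]
      constructor
      · rintro ⟨h1, h2, h3⟩
        have hd : (k : Int) ∣ (j : Int) := by
          simpa using dvd_add h3 (dvd_mul_right (k:Int) (k:Int))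
        constructor
        · exact_mod_cast h1
        · exact_mod_cast hd
      · rintro ⟨h1, h2⟩
        refine ⟨by exact_mod_cast h1, by exact_mod_cast hj, ?_⟩
        have hd : (k : Int) ∣ (j : Int) := by exact_mod_cast h2
        exact dvd_sub hd (dvd_mul_right (k:Int) (k:Int))
    by_cases hc : k * k ≤ j ∧ k ∣ j
    · rw [if_pos (hmem.mpr hc)]
      simp only [Bool.false_eq_true, false_iff]
      rw [pvGood_succ]
      rintro ⟨-, hnk⟩
      exact hnk hp hc.1 hc.2
    · rw [if_neg (fun hm => hc (hmem.mp hm)), hval j hj, pvGood_succ]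
      constructor
      · exact fun hg => ⟨hg, fun _ hsq hd => absurd ⟨hsq, hd⟩ hc⟩
      · exact fun hg => hg.1
  · -- guard is false, sieve unchanged
    have hgk : sv[k]! = false := by
      rcases Bool.eq_false_or_eq_true (sv[k]!) with hb | hb
      · exact absurd ((pvGoodSelf k hk).mp ((hval k hklt).mp hb)) hp
      · exact hb
    have hguard : pvStepA sv (k : Int) = sv := by
      simp [pvStepA, hgk]
    rw [hguard]
    refine ⟨hsz, fun j hj => ?_⟩
    rw [hval j hj, pvGood_succ]
    constructor
    · exact fun hg => ⟨hg, fun hpk => absurd hpk hp⟩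
    · exact fun hg => hg.1

def pvSieveAux (k : Nat) : Array Bool :=
  (PySem.List.pyRange 2 (k : Int) 1).foldl pvStepA pvInit

lemma pvInv_sieveAux (k : Nat) (hk : 2 ≤ k) (hk2 : k ≤ 2000000) :
    pvInv k (pvSieveAux k) := by
  revert hk2
  induction k, hk using Nat.le_induction with
  | base =>
    intro _
    unfold pvSieveAux
    rw [show ((2:Nat):Int) = 2 by norm_num, PySem.List.pyRange_one_eq_nil (by omega),
        List.foldl_nil]
    refine ⟨pvInit_size, fun j hj => ?_⟩
    rw [pvInit_val j hj]
    unfold pvGood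
    constructor
    · intro h2
      refine ⟨by simpa using h2, fun p hlt hpp => ?_⟩
      have := hpp.two_le; omega
    · intro h; simpa using h.1
  | succ k hk2' ih =>
    intro hle
    unfold pvSieveAux at *
    rw [show ((k+1:Nat):Int) = (k:Int) + 1 by push_cast; ring,
        PySem.List.pyRange_one_succ_right (by exact_mod_cast (by omega : 2 ≤ k)),
        List.foldl_append, List.foldl_cons, List.foldl_nil]
    exact pvInv_step k hk2' (by omega) _ (ih (by omega))

lemma pvSieveA_eq : pvSieveA = pvSieveAux 1414 := by
  unfold pvSieveA pvSieveAux
  rw [show Nat.sqrt 2000000 = 1414 from by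
    have h1 : 1414 ≤ Nat.sqrt 2000000 := Nat.le_sqrt.mpr (by norm_num)
    have h2 : Nat.sqrt 2000000 < 1415 := Nat.sqrt_lt.mpr (by norm_num)
    omega]

lemma pvSieveA_val (j : Nat) (hj : j < 2000000) :
    (pvSieveA[j]! = true) ↔ Nat.Prime j := by
  have h := (pvInv_sieveAux 1414 (by omega) (by omega)).2 j hj
  rw [← pvSieveA_eq, pvGood_final j hj] at h
  exact h

-- ---- extraction: the prime list ----

def pvPrimeL (k : Nat) : List Int :=
  ((List.range k).filter (fun j => decide (Nat.Prime j))).map Nat.cast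

lemma pvPrimeL_succ (k : Nat) :
    pvPrimeL (k + 1) = pvPrimeL k ++ (if Nat.Prime k then [(k : Int)] else []) := by
  unfold pvPrimeL
  by_cases hp : Nat.Prime k <;> simp [List.range_succ, List.filter_append, hp]

def pvExtractAux (k : Nat) : Array Int :=
  (PySem.List.pyRange 0 (k : Int) 1).foldl pvStepP #[]

lemma pvExtractAux_toList (k : Nat) (hk : k ≤ 2000000) :
    (pvExtractAux k).toList = pvPrimeL k := by
  induction k with
  | zero =>
    unfold pvExtractAux
    rw [show ((0:Nat):Int) = 0 by norm_num, PySem.List.pyRange_one_eq_nil (by omega)]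
    simp [pvPrimeL]
  | succ k ih =>
    unfold pvExtractAux at *
    rw [show ((k+1:Nat):Int) = (k:Int) + 1 by push_cast; ring,
        PySem.List.pyRange_one_succ_right (by positivity),
        List.foldl_append, List.foldl_cons, List.foldl_nil,
        pvPrimeL_succ]
    have hstep : pvStepP ((PySem.List.pyRange 0 (k:Int) 1).foldl pvStepP #[]) (k:Int) =
        if Nat.Prime k then ((PySem.List.pyRange 0 (k:Int) 1).foldl pvStepP #[]).push (k:Int)
        else (PySem.List.pyRange 0 (k:Int) 1).foldl pvStepP #[] := by
      unfold pvStepP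
      have hguard : (pvSieveA[((k:Int)).toNat]! = true) ↔ Nat.Prime k := by
        rw [Int.toNat_natCast]
        exact pvSieveA_val k (by omega)
      by_cases hp : Nat.Prime k
      · rw [if_pos (hguard.mpr hp), if_pos hp]
      · rw [if_neg (fun hb => hp (hguard.mp hb)), if_neg hp]
    rw [hstep]
    by_cases hp : Nat.Prime k
    · rw [if_pos hp, if_pos hp, Array.toList_push, ih (by omega)]
    · rw [if_neg hp, if_neg hp, ih (by omega)]; simp

lemma pvPrimesA_toList : pvPrimesA.toList = pvPrimeL 2000000 := by
  have : pvPrimesA = pvExtractAux 2000000 := by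
    unfold pvPrimesA pvExtractAux
    norm_num
  rw [this, pvExtractAux_toList 2000000 le_rfl]

-- ---- B: trial division ----

lemma pvTrial_go (primes : Array Int) (m : Int) (k : Nat)
    (hmono : ∀ i i' : Nat, i ≤ i' → i' < primes.size → primes[i]! ≤ primes[i']!)
    (hpos : ∀ i : Nat, i < primes.size → 0 < primes[i]!) :
    (pvTrial primes m k = true ↔
      ∀ i : Nat, k ≤ i → i < primes.size → primes[i]! * primes[i]! ≤ m → ¬ (primes[i]! ∣ m)) := by
  generalize hn : primes.size - k = n
  induction n generalizing k with
  | zero =>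
    have hk : ¬ k < primes.size := by omega
    rw [pvTrial, dif_neg hk]
    constructor
    · intro _ i _ hi _ _
      omega
    · intro _
      rfl
  | succ n ih =>
    have hk : k < primes.size := by omega
    rw [pvTrial]
    simp only [dif_pos hk]
    have hpk : primes[k] = primes[k]! := (getElem!_pos primes k hk).symm
    by_cases h1 : primes[k] * primes[k] > m
    · rw [if_pos h1]
      constructor
      · intro _ i hki hi hle hdvd
        have hle' := hmono k i hki hi
        have := hpos k hk
        rw [← hpk] at hle' this
        nlinarith [hle, h1]
      · intro _
        rfl
    · rw [if_neg h1]
      push Not at h1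
      by_cases h2 : PySem.Int.mod m primes[k] == 0
      · rw [if_pos h2]
        have hdvd : primes[k]! ∣ m := by
          rw [← hpk]
          exact (PySem.Int.mod_eq_zero_iff_dvd m primes[k]).mp (by simpa using h2)
        constructor
        · intro hfalse
          cases hfalse
        · intro hall
          exact absurd hdvd (hall k le_rfl hk (by rw [← hpk]; exact h1))
      · rw [if_neg h2]
        rw [ih (k+1) (by omega)]
        have hnd : ¬ primes[k]! ∣ m := by
          rw [← hpk]
          intro hd
          exact h2 (by simpa using (PySem.Int.mod_eq_zero_iff_dvd m primes[k]).mpr hd)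
        constructor
        · intro hall i hki hi hle hdvd
          rcases Nat.eq_or_lt_of_le hki with rfl | hlt
          · exact hnd hdvd
          · exact hall i hlt hi hle hdvd
        · intro hall i hki hi hle hdvd
          exact hall i (by omega) hi hle hdvd

lemma pvTrial_spec (primes : Array Int) (m : Nat) (hm : 2 ≤ m)
    (hL : primes.toList = pvPrimeL m) :
    pvTrial primes (m : Int) 0 = decide (Nat.Prime m) := by
  have hmemL : ∀ x : Int, x ∈ pvPrimeL m ↔ ∃ q : Nat, Nat.Prime q ∧ q < m ∧ x = (q:Int) := by
    intro x
    unfold pvPrimeL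
    simp only [List.mem_map, List.mem_filter, List.mem_range, decide_eq_true_eq]
    constructor
    · rintro ⟨q, ⟨hq, hqp⟩, rfl⟩
      exact ⟨q, hqp, hq, rfl⟩
    · rintro ⟨q, hqp, hq, rfl⟩
      exact ⟨q, ⟨hq, hqp⟩, rfl⟩
  have hlen : primes.size = (pvPrimeL m).length := by
    rw [← Array.length_toList, hL]
  have hget : ∀ i : Nat, i < primes.size → primes[i]! ∈ pvPrimeL m := by
    intro i hi
    rw [getElem!_pos primes i hi, ← Array.getElem_toList (by simpa using hi)]
    rw [← hL]
    exact List.getElem_mem _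
  have hpos : ∀ i : Nat, i < primes.size → 0 < primes[i]! := by
    intro i hi
    obtain ⟨q, hqp, -, he⟩ := (hmemL _).mp (hget i hi)
    rw [he]
    exact_mod_cast hqp.pos
  have hpw : (pvPrimeL m).Pairwise (· < ·) := by
    unfold pvPrimeL
    refine List.Pairwise.map _ (fun a b h => by exact_mod_cast h) ?_
    exact (List.pairwise_lt_range).filter _
  have hmono : ∀ i i' : Nat, i ≤ i' → i' < primes.size → primes[i]! ≤ primes[i']! := by
    intro i i' hle hi'
    rcases Nat.eq_or_lt_of_le hle with rfl | hlt
    · exact le_rfl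
    · have hi : i < primes.size := by omega
      rw [getElem!_pos primes i hi, getElem!_pos primes i' hi',
          ← Array.getElem_toList (by simpa using hi), ← Array.getElem_toList (by simpa using hi')]
      have e1 : primes.toList[i]'(by simpa using hi) = (pvPrimeL m)[i]'(by omega) :=
        List.getElem_of_eq hL _
      have e2 : primes.toList[i']'(by simpa using hi') = (pvPrimeL m)[i']'(by omega) :=
        List.getElem_of_eq hL _
      rw [e1, e2]
      exact le_of_lt (List.pairwise_iff_getElem.mp hpw i i' (by omega) (by omega) hlt)
  have hiff := pvTrial_go primes (m:Int) 0 hmono hpos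
  have hcond : (∀ i : Nat, 0 ≤ i → i < primes.size → primes[i]! * primes[i]! ≤ (m:Int) → ¬ (primes[i]! ∣ (m:Int))) ↔ Nat.Prime m := by
    constructor
    · intro h
      rw [← pvGoodSelf m hm]
      refine ⟨hm, fun q hq hqp hsq hdvd => ?_⟩
      have hx : (q:Int) ∈ pvPrimeL m := (hmemL _).mpr ⟨q, hqp, hq, rfl⟩
      rw [← hL] at hx
      obtain ⟨i, hi, hqe⟩ := List.getElem_of_mem hx
      have hisz : i < primes.size := by simpa using hi
      have hqe' : primes[i]! = (q:Int) := by
        rw [getElem!_pos primes i hisz, ← Array.getElem_toList hi]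
        exact hqe
      refine h i (by omega) hisz ?_ ?_
      · rw [hqe']
        exact_mod_cast hsq
      · rw [hqe']
        exact_mod_cast hdvd
    · intro hp i _ hi hsq hdvd
      obtain ⟨q, hqp, hqm, he⟩ := (hmemL _).mp (hget i hi)
      rw [he] at hsq hdvd
      have hqd : q ∣ m := by exact_mod_cast hdvd
      have := (Nat.Prime.eq_one_or_self_of_dvd hp q hqd).resolve_left hqp.one_lt.ne'
      omega
  by_cases hp : Nat.Prime m
  · rw [show decide (Nat.Prime m) = true by simp [hp]]
    rw [hiff]
    exact fun i h0 => hcond.mpr hp i (by omega)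
  · rw [show decide (Nat.Prime m) = false by simp [hp]]
    rcases Bool.eq_false_or_eq_true (pvTrial primes (m:Int) 0) with hb | hb
    · exact absurd (hcond.mp (fun i _ => hiff.mp hb i (by omega))) hp
    · exact hb

def pvBAux (k : Nat) : Array Int :=
  (PySem.List.pyRange 2 (k : Int) 1).foldl pvStepB #[]

lemma pvBAux_toList (k : Nat) (hk : 2 ≤ k) : (pvBAux k).toList = pvPrimeL k := by
  induction k, hk using Nat.le_induction with
  | base =>
    unfold pvBAux
    rw [show ((2:Nat):Int) = 2 by norm_num, PySem.List.pyRange_one_eq_nil (by omega)]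
    simp [pvPrimeL, List.range_succ, Nat.not_prime_zero, Nat.not_prime_one]
  | succ k hk2 ih =>
    unfold pvBAux at *
    have hstep : ∀ P : Array Int, pvTrial P (k:Int) 0 = decide (Nat.Prime k) →
        (pvStepB P (k:Int)).toList = P.toList ++ (if Nat.Prime k then [(k:Int)] else []) := by
      intro P hP
      unfold pvStepB
      rw [hP]
      by_cases hp : Nat.Prime k
      · simp [hp]
      · simp [hp]
    rw [show ((k+1:Nat):Int) = (k:Int) + 1 by push_cast; ring,
        PySem.List.pyRange_one_succ_right (by exact_mod_cast (by omega : 2 ≤ k)),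
        List.foldl_append, List.foldl_cons, List.foldl_nil, pvPrimeL_succ,
        hstep _ (pvTrial_spec _ k hk2 ih), ih]

lemma pvPrimesB_toList : pvPrimesB.toList = pvPrimeL 2000000 := by
  have : pvPrimesB = pvBAux 2000000 := by
    unfold pvPrimesB pvBAux
    norm_num
  rw [this, pvBAux_toList 2000000 (by omega)]

-- ===== VERDICT (by name: the statement is the Claim_ definition above) =====
theorem generate_large_primes_spec : Claim_equal_generate_large_primes := by
  intro i1 i2 _ _
  show _ = _
  unfold generate_large_primes generate_large_primes_alt
  rw [pvPrimesA_toList, pvPrimesB_toList]
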